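-- pv_equiv track=rewrite | github.com/scgon/streamlit-project | pages/1-password_game.py | rule8
-- ===== SOURCE A (Python) =====
-- def rule8(password):
--     roman_numerals = ['I', 'V', 'X', 'L', 'C', 'D', 'M']
--     roman_numerals_dict = {'I': 1, 'V': 5, 'X': 10, 'L': 50, 'C': 100, 'D': 500, 'M': 1000}
--     total = 1
--
--     for i in password:
--         if i.isupper():
--             if i in roman_numerals:
--                 total *= roman_numerals_dict[i]
--
--     if total == 5000:
--         return True
--     else:
--         return False
-- ===== SOURCE B (Python) =====
-- def rule8(password):
--     # Tabulate character frequencies once, then aggregate over the seven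
--     # Roman symbols with value ** count.
--     counts = {}
--     for ch in password:
--         counts[ch] = counts.get(ch, 0) + 1
--     product = 1
--     for sym, val in (('I', 1), ('V', 5), ('X', 10), ('L', 50),
--                      ('C', 100), ('D', 500), ('M', 1000)):
--         product *= val ** counts.get(sym, 0)
--     return product == 5000
-- ===== Notes on version B (the rewrite author's own statement) =====
-- stated objective: alternative
-- what changed: B builds a character-frequency table in one pass and then multiplies value**count over the seven Roman symbols, instead of A's per-character multiply guarded by isupper and a list membership test.
import Mathlib
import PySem

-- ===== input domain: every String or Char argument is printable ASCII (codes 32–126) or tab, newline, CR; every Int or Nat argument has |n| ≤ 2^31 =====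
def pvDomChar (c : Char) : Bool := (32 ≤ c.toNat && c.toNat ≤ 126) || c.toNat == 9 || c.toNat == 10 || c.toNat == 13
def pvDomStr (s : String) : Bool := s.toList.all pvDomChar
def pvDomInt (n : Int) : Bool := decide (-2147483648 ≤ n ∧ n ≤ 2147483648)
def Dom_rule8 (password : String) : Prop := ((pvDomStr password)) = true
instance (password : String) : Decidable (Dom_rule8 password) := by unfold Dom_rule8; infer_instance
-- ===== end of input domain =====

-- B tabulates character frequencies once and aggregates value ** count over the
-- seven Roman symbols, instead of A's per-character multiply; same cost, different decomposition.


-- ===== PORT A =====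
-- literal transliteration of A: scan the password, multiply the running total by the
-- numeral value of every uppercase Roman character, compare with 5000.
def rule8RomanList : List Char := ['I', 'V', 'X', 'L', 'C', 'D', 'M']

def rule8RomanDict : PySem.Dict Char Int :=
  ((((((PySem.Dict.empty.insert 'I' 1).insert 'V' 5).insert 'X' 10).insert 'L' 50).insert
      'C' 100).insert 'D' 500).insert 'M' 1000

def rule8 (password : String) : Bool :=
  let total : Int :=
    password.toList.foldl
      (fun total i =>
        if PySem.Chars.isupper i then
          if rule8RomanList.contains i then
            -- roman_numerals_dict[i]: the key is present here (i ∈ rule8RomanList), so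
            -- Python's d[i] never raises; getD's default is unreachable.
            total * rule8RomanDict.getD i 1
          else total
        else total)
      1
  if total == 5000 then true else false

-- ===== PORT B =====
-- transliteration of Source B: build the frequency dict in one pass, then fold over the
-- seven (symbol, value) pairs multiplying value ^ count.
def rule8_alt (password : String) : Bool :=
  let counts : PySem.Dict Char Int :=
    password.toList.foldl (fun d ch => d.insert ch (d.getD ch 0 + 1)) PySem.Dict.empty
  let product : Int :=
    ([('I', (1 : Int)), ('V', 5), ('X', 10), ('L', 50), ('C', 100), ('D', 500),
        ('M', 1000)]).foldl
      -- counts.get(sym, 0) is a count, hence ≥ 0; .toNat is exact for val ** count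
      (fun product sv => product * sv.2 ^ (counts.getD sv.1 0).toNat)
      1
  product == 5000

-- ===== PRECONDITION & SPEC =====
def Spec_rule8 (password : String) (out : Bool) : Prop := out = rule8_alt password
instance (password : String) (out : Bool) : Decidable (Spec_rule8 password out) := by unfold Spec_rule8; infer_instance

-- ===== CLAIM (what is proved, stated in full; the proofs are below) =====
def Claim_equal_rule8 : Prop := ∀ (password : String), Dom_rule8 password → Spec_rule8 password (rule8 password)

-- ===== LEMMAS AND PROOFS =====

theorem rule8_decide_beq (a b : Int) : decide (a = b) = (a == b) := by
  by_cases h : a = b <;> simp [h]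

/-- The multiplier A's loop applies for one character. -/
def rule8Val (c : Char) : Int :=
  if c = 'I' then 1 else if c = 'V' then 5 else if c = 'X' then 10 else
  if c = 'L' then 50 else if c = 'C' then 100 else if c = 'D' then 500 else
  if c = 'M' then 1000 else 1

theorem rule8_stepVal (t : Int) (c : Char) :
    (if PySem.Chars.isupper c then
        if rule8RomanList.contains c then t * rule8RomanDict.getD c 1 else t
      else t) = t * rule8Val c := by
  by_cases hI : c = 'I'
  · subst hI
    simp [rule8Val, show PySem.Chars.isupper 'I' = true by decide,
      show ('I' ∈ rule8RomanList) by decide,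
      show rule8RomanDict.getD 'I' 1 = 1 by decide]
  by_cases hV : c = 'V'
  · subst hV
    simp [rule8Val, show PySem.Chars.isupper 'V' = true by decide,
      show ('V' ∈ rule8RomanList) by decide,
      show rule8RomanDict.getD 'V' 1 = 5 by decide]
  by_cases hX : c = 'X'
  · subst hX
    simp [rule8Val, show PySem.Chars.isupper 'X' = true by decide,
      show ('X' ∈ rule8RomanList) by decide,
      show rule8RomanDict.getD 'X' 1 = 10 by decide]
  by_cases hL : c = 'L'
  · subst hL
    simp [rule8Val, show PySem.Chars.isupper 'L' = true by decide,
      show ('L' ∈ rule8RomanList) by decide,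
      show rule8RomanDict.getD 'L' 1 = 50 by decide]
  by_cases hC : c = 'C'
  · subst hC
    simp [rule8Val, show PySem.Chars.isupper 'C' = true by decide,
      show ('C' ∈ rule8RomanList) by decide,
      show rule8RomanDict.getD 'C' 1 = 100 by decide]
  by_cases hD : c = 'D'
  · subst hD
    simp [rule8Val, show PySem.Chars.isupper 'D' = true by decide,
      show ('D' ∈ rule8RomanList) by decide,
      show rule8RomanDict.getD 'D' 1 = 500 by decide]
  by_cases hM : c = 'M'
  · subst hM
    simp [rule8Val, show PySem.Chars.isupper 'M' = true by decide,
      show ('M' ∈ rule8RomanList) by decide,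
      show rule8RomanDict.getD 'M' 1 = 1000 by decide]
  have hmem : c ∉ rule8RomanList := by
    simp [rule8RomanList, hI, hV, hX, hL, hC, hD, hM]
  simp [hmem, rule8Val, hI, hV, hX, hL, hC, hD, hM]

theorem rule8_foldA (l : List Char) (a : Int) :
    l.foldl
      (fun total i =>
        if PySem.Chars.isupper i then
          if rule8RomanList.contains i then total * rule8RomanDict.getD i 1 else total
        else total)
      a = a * (l.map rule8Val).prod := by
  induction l generalizing a with
  | nil => simp
  | cons c t ih =>
    rw [List.foldl_cons, rule8_stepVal, ih, List.map_cons, List.prod_cons, mul_assoc]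

theorem rule8_prodB (l : List Char) :
    (1 : Int) ^ l.count 'I' * 5 ^ l.count 'V' * 10 ^ l.count 'X' * 50 ^ l.count 'L' *
        100 ^ l.count 'C' * 500 ^ l.count 'D' * 1000 ^ l.count 'M' =
      (l.map rule8Val).prod := by
  induction l with
  | nil => simp
  | cons c t ih =>
    by_cases hI : c = 'I'
    · subst hI; simp only [List.count_cons, List.map_cons, List.prod_cons]
      simp [rule8Val, ← ih]
    by_cases hV : c = 'V'
    · subst hV; simp only [List.count_cons, List.map_cons, List.prod_cons]
      simp [rule8Val, pow_succ, ← ih]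
      try ring
    by_cases hX : c = 'X'
    · subst hX; simp only [List.count_cons, List.map_cons, List.prod_cons]
      simp [rule8Val, pow_succ, ← ih]
      try ring
    by_cases hL : c = 'L'
    · subst hL; simp only [List.count_cons, List.map_cons, List.prod_cons]
      simp [rule8Val, pow_succ, ← ih]
      try ring
    by_cases hC : c = 'C'
    · subst hC; simp only [List.count_cons, List.map_cons, List.prod_cons]
      simp [rule8Val, pow_succ, ← ih]
      try ring
    by_cases hD : c = 'D'
    · subst hD; simp only [List.count_cons, List.map_cons, List.prod_cons]
      simp [rule8Val, pow_succ, ← ih]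
      try ring
    by_cases hM : c = 'M'
    · subst hM; simp only [List.count_cons, List.map_cons, List.prod_cons]
      simp [rule8Val, pow_succ, ← ih]
      try ring
    · simp only [List.count_cons, List.map_cons, List.prod_cons]
      simp [rule8Val, hI, hV, hX, hL, hC, hD, hM, ← ih]
      try ring

-- ===== VERDICT (by name: the statement is the Claim_ definition above) =====
theorem rule8_spec : Claim_equal_rule8 := by
  intro password _
  unfold Spec_rule8 rule8 rule8_alt
  simp only [rule8_foldA, PySem.Dict.getD_foldl_insert_add_one, PySem.Dict.getD_empty,
    List.foldl_cons, List.foldl_nil, zero_add, Int.toNat_natCast]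
  rw [one_mul, ← rule8_prodB password.toList]
  simp [rule8_decide_beq]
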